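-- pv_equiv track=rewrite | github.com/lebrice/Sequoia | sequoia/common/spaces/sparse_test.py | is_sparse
-- ===== SOURCE A (Python) =====
-- from typing import Iterable
--
-- def is_sparse(iterable: Iterable[bool]) -> bool:
--     """ Returns wether some (but not all) values in the iterable are None. """
--     none_values: int = 0
--     non_none_values: int = 0
--     for value in iterable:
--         if value is None:
--             none_values += 1
--             if non_none_values:
--                 return True
--         else:
--             non_none_values += 1
--             if none_values:
--                 return True
--     return False
--     # Equivalent, but with a copy:
--     values = list(values)
--     return any(v is None for v in values) and not all(v is None for v in values)
-- ===== SOURCE B (Python) =====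
-- def is_sparse(iterable) -> bool:
--     values = list(iterable)
--     return any(v is None for v in values) and not all(v is None for v in values)
-- ===== Notes on version B (the rewrite author's own statement) =====
-- stated objective: idiomatic
-- what changed: Replaces the interleaved two-counter loop with early return by materializing the iterable once and combining any/all over 'v is None'.
import Mathlib
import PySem

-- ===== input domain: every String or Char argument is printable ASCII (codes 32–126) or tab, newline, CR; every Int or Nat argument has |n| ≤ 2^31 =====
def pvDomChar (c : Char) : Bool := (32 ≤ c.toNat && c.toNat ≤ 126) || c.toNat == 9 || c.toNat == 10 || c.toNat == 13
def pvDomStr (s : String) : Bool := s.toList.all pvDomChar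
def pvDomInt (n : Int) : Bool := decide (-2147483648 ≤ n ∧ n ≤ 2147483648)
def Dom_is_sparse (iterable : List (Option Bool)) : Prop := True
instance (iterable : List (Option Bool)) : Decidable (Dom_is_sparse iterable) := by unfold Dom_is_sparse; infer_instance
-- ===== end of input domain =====

-- B replaces A's two-counter loop with early return by a single materialized pass
-- combining any/all ("some value is None and not all are"): more idiomatic, same cost.

-- ===== PORT A =====
-- the for-loop of A, carrying the two counters none_values / non_none_values
def is_sparse_loop (values : List (Option Bool)) (none_values non_none_values : Int) : Bool :=
  match values with
  | [] => false
  | value :: rest =>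
    if value = none then
      -- none_values += 1; if non_none_values: return True
      if non_none_values ≠ 0 then true
      else is_sparse_loop rest (none_values + 1) non_none_values
    else
      -- non_none_values += 1; if none_values: return True
      if none_values ≠ 0 then true
      else is_sparse_loop rest none_values (non_none_values + 1)

def is_sparse (iterable : List (Option Bool)) : Bool :=
  is_sparse_loop iterable 0 0

-- ===== PORT B =====
def is_sparse_alt (iterable : List (Option Bool)) : Bool :=
  -- values = list(iterable); any(v is None for v in values) and not all(...)
  let values := iterable
  (values.any fun v => v = none) && !(values.all fun v => v = none)

-- ===== PRECONDITION & SPEC =====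
def Spec_is_sparse (iterable : List (Option Bool)) (out : Bool) : Prop := out = is_sparse_alt iterable
instance (iterable : List (Option Bool)) (out : Bool) : Decidable (Spec_is_sparse iterable out) := by unfold Spec_is_sparse; infer_instance

-- ===== CLAIM (what is proved, stated in full; the proofs are below) =====
def Claim_equal_is_sparse : Prop := ∀ (iterable : List (Option Bool)), Dom_is_sparse iterable → Spec_is_sparse iterable (is_sparse iterable)

-- ===== LEMMAS AND PROOFS =====

-- loop invariant: in every reachable state at most one counter is nonzero, and the loop
-- returns true iff both categories have been seen (counting the counters already nonzero)
theorem is_sparse_loop_eq (values : List (Option Bool)) (n0 n1 : Int)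
    (h0 : 0 ≤ n0) (h1 : 0 ≤ n1) (h : n0 = 0 ∨ n1 = 0) :
    is_sparse_loop values n0 n1 =
      ((decide (n0 ≠ 0) || values.any fun v => v = none) &&
       (decide (n1 ≠ 0) || values.any fun v => v ≠ none)) := by
  induction values generalizing n0 n1 with
  | nil => rcases h with h | h <;> simp [is_sparse_loop, h]
  | cons v rest ih =>
    by_cases hv : v = none
    · by_cases h1 : n1 ≠ 0
      · simp [is_sparse_loop, hv, h1]
      · have h1' : n1 = 0 := by omega
        have hne : n0 + 1 ≠ 0 := by omega
        rw [is_sparse_loop]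
        simp only [hv, if_neg h1]
        rw [ih (n0 + 1) n1 (by omega) (by omega) (Or.inr h1')]
        simp [h1', hne]
    · by_cases h0 : n0 ≠ 0
      · simp [is_sparse_loop, hv, h0]
      · have h0' : n0 = 0 := by omega
        have hne : n1 + 1 ≠ 0 := by omega
        rw [is_sparse_loop]
        simp only [hv, if_neg h0]
        rw [ih n0 (n1 + 1) (by omega) (by omega) (Or.inl h0')]
        simp [hv, h0', hne]

theorem any_ne_none_eq_not_all (values : List (Option Bool)) :
    (values.any fun v => v ≠ none) = !(values.all fun v => v = none) := by
  induction values with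
  | nil => simp
  | cons v rest ih =>
    simp only [List.any_cons, List.all_cons, Bool.not_and, ← decide_not, ih]

-- ===== VERDICT (by name: the statement is the Claim_ definition above) =====
theorem is_sparse_spec : Claim_equal_is_sparse := by
  intro iterable _
  unfold Spec_is_sparse is_sparse is_sparse_alt
  rw [is_sparse_loop_eq iterable 0 0 le_rfl le_rfl (Or.inl rfl), any_ne_none_eq_not_all]
  simp
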